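-- pv_equiv track=rewrite | github.com/kristomu/voting-scripts | linear_programming/generators/lpgen.py | AMPL_variable_defs
-- ===== SOURCE A (Python) =====
-- DEF_CONSTRAINT = 0
--
-- DEF_INTEGER = 1
--
-- def is_definition(deftype):
-- 	return deftype != DEF_CONSTRAINT
--
-- def AMPL_variable_defs(def_constraints):
-- 	definition_str = ""
--
-- 	variables_seen = set()
-- 	for deftype, var_name, const_type, rhs in sorted(def_constraints):
-- 		# If it's not a definition, skip.
-- 		if not is_definition(deftype): continue
-- 		# If it's a duplicate definition, skip.
-- 		if var_name in variables_seen: continue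
--
-- 		if deftype == DEF_INTEGER:
-- 			qualifier = " integer"
-- 		else:
-- 			qualifier = ""
--
-- 		definition_str += "var %s%s;\n" % (var_name, qualifier);
-- 		variables_seen.add(var_name)
--
-- 	return definition_str
-- ===== SOURCE B (Python) =====
-- DEF_CONSTRAINT = 0
--
-- DEF_INTEGER = 1
--
-- def AMPL_variable_defs(def_constraints):
--     # One pass: for each variable name, keep the minimum full tuple among its
--     # definition entries; then emit the representatives in sorted order.
--     best = {}
--     for entry in def_constraints:
--         deftype, var_name, const_type, rhs = entry
--         if deftype == DEF_CONSTRAINT: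
--             continue
--         cur = best.get(var_name)
--         if cur is None or entry < cur:
--             best[var_name] = entry
--     pieces = []
--     for deftype, var_name, const_type, rhs in sorted(best.values()):
--         qualifier = " integer" if deftype == DEF_INTEGER else ""
--         pieces.append("var %s%s;\n" % (var_name, qualifier))
--     return "".join(pieces)
-- ===== Notes on version B (the rewrite author's own statement) =====
-- stated objective: alternative
-- what changed: A sorts the whole list and scans it with a seen-set; B makes one pass over the unsorted list keeping the minimum tuple per variable name in a dict, then sorts only the per-name representatives and emits them.
import Mathlib
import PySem

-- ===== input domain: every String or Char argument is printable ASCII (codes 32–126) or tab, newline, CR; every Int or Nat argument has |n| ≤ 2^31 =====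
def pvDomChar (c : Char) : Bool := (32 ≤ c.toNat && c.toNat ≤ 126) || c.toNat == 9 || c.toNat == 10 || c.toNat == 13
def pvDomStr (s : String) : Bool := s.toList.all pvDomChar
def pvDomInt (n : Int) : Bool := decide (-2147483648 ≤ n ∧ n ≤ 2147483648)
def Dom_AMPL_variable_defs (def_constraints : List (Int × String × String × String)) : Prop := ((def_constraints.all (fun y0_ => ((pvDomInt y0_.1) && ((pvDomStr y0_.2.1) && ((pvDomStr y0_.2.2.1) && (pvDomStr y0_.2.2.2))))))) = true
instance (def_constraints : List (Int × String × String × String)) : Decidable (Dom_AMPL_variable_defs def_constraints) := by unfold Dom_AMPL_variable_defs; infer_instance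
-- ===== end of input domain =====

-- B replaces A's sort-everything-then-scan-with-seen-set by one unsorted pass keeping the
-- minimum tuple per variable name in a dict, then sorting only the representatives; same cost class.

-- pvKey encodes Python's lexicographic 4-tuple comparison as a Lean lexicographic order
-- (order-isomorphic, injective): exact for sorted(def_constraints) and for 'entry < cur'.
def pvKey (t : Int × String × String × String) : Lex (Int × Lex (String × Lex (String × String))) :=
  toLex (t.1, toLex (t.2.1, toLex (t.2.2.1, t.2.2.2)))

-- "var %s%s;\n" % (var_name, qualifier) with qualifier = " integer" iff deftype == DEF_INTEGER
def pvFmt (e : Int × String × String × String) : String :=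
  "var " ++ e.2.1 ++ (if e.1 == 1 then " integer" else "") ++ ";\n"

-- ===== PORT A =====
def is_definition (deftype : Int) : Bool := deftype != 0

def pvAStep (st : String × PySem.Set String) (e : Int × String × String × String) :
    String × PySem.Set String :=
  if !(is_definition e.1) then st
  else if PySem.Set.contains st.2 e.2.1 then st
  else (st.1 ++ pvFmt e, PySem.Set.add st.2 e.2.1)

def AMPL_variable_defs (def_constraints : List (Int × String × String × String)) : String :=
  ((PySem.List.sorted def_constraints pvKey false).foldl pvAStep ("", PySem.Set.empty)).1

-- ===== PORT B =====
def pvBStep (best : PySem.Dict String (Int × String × String × String))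
    (entry : Int × String × String × String) :
    PySem.Dict String (Int × String × String × String) :=
  if entry.1 == 0 then best
  else
    match best.get? entry.2.1 with
    | none => best.insert entry.2.1 entry
    | some cur => if pvKey entry < pvKey cur then best.insert entry.2.1 entry else best

def AMPL_variable_defs_alt (def_constraints : List (Int × String × String × String)) : String :=
  let best := def_constraints.foldl pvBStep PySem.Dict.empty
  let pieces := (PySem.List.sorted best.values pvKey false).map pvFmt
  PySem.Str.join "" pieces

-- ===== PRECONDITION & SPEC =====
def Spec_AMPL_variable_defs (def_constraints : List (Int × String × String × String)) (out : String) : Prop := out = AMPL_variable_defs_alt def_constraints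
instance (def_constraints : List (Int × String × String × String)) (out : String) : Decidable (Spec_AMPL_variable_defs def_constraints out) := by unfold Spec_AMPL_variable_defs; infer_instance

-- ===== CLAIM (what is proved, stated in full; the proofs are below) =====
def Claim_equal_AMPL_variable_defs : Prop := ∀ (def_constraints : List (Int × String × String × String)), Dom_AMPL_variable_defs def_constraints → Spec_AMPL_variable_defs def_constraints (AMPL_variable_defs def_constraints)

-- ===== LEMMAS AND PROOFS =====

lemma pvKey_inj : Function.Injective pvKey := by
  rintro ⟨a1, a2, a3, a4⟩ ⟨b1, b2, b3, b4⟩ h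
  simp only [pvKey, toLex_inj, Prod.mk.injEq] at h
  simp [h.1, h.2.1, h.2.2.1, h.2.2.2]

lemma pvContains_iff {s : PySem.Set String} {y : String} :
    PySem.Set.contains s y = true ↔ y ∈ s := by
  simp [PySem.Set.contains]

lemma pvMem_add {s : PySem.Set String} {a y : String} :
    y ∈ PySem.Set.add s a ↔ y = a ∨ y ∈ s := by
  constructor
  · intro h
    unfold PySem.Set.add at h
    split at h
    · exact Or.inr h
    · rcases List.mem_append.1 h with h | h
      · exact Or.inr h
      · exact Or.inl (List.mem_singleton.1 h)
  · intro h
    unfold PySem.Set.add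
    split
    · rcases h with h | h
      · subst h; exact pvContains_iff.1 (by assumption)
      · exact h
    · rcases h with h | h
      · subst h; exact List.mem_append_right _ (List.mem_singleton.2 rfl)
      · exact List.mem_append_left _ h

-- minimal definition entry per name: what B's dict fold maintains
def pvInv (lp : List (Int × String × String × String))
    (d : PySem.Dict String (Int × String × String × String)) : Prop :=
  d.keys.Nodup ∧
  (∀ n v, d.get? n = some v ↔
      (v ∈ lp ∧ v.1 ≠ 0 ∧ v.2.1 = n ∧
        ∀ y ∈ lp, y.1 ≠ 0 → y.2.1 = n → pvKey v ≤ pvKey y)) ∧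
  (∀ n, d.get? n = none ↔ ∀ y ∈ lp, y.1 ≠ 0 → y.2.1 ≠ n)

lemma pvInv_step (lp : List (Int × String × String × String))
    (d : PySem.Dict String (Int × String × String × String))
    (e : Int × String × String × String) (h : pvInv lp d) :
    pvInv (lp ++ [e]) (pvBStep d e) := by
  obtain ⟨hnd, hsome, hnone⟩ := h
  unfold pvBStep
  by_cases he : e.1 = 0
  · rw [if_pos (by simpa using he)]
    refine ⟨hnd, fun n v => ?_, fun n => ?_⟩
    · rw [hsome]
      constructor
      · rintro ⟨hv, h1, h2, h3⟩
        refine ⟨List.mem_append_left _ hv, h1, h2, fun y hy hy1 hy2 => ?_⟩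
        rcases List.mem_append.1 hy with hy | hy
        · exact h3 y hy hy1 hy2
        · rw [List.mem_singleton] at hy; subst hy; exact absurd he hy1
      · rintro ⟨hv, h1, h2, h3⟩
        rcases List.mem_append.1 hv with hv | hv
        · exact ⟨hv, h1, h2, fun y hy => h3 y (List.mem_append_left _ hy)⟩
        · rw [List.mem_singleton] at hv; subst hv; exact absurd he h1
    · rw [hnone]
      constructor
      · intro h y hy hy1
        rcases List.mem_append.1 hy with hy | hy
        · exact h y hy hy1
        · rw [List.mem_singleton] at hy; subst hy; exact absurd he hy1
      · intro h y hy hy1; exact h y (List.mem_append_left _ hy) hy1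
  · rw [if_neg (by simpa using he)]
    rcases hg : d.get? e.2.1 with _ | cur
    · -- no previous definition of this name
      have hempty : ∀ y ∈ lp, y.1 ≠ 0 → y.2.1 ≠ e.2.1 := (hnone e.2.1).1 hg
      refine ⟨PySem.Dict.nodup_keys_insert _ _ _ hnd, fun n v => ?_, fun n => ?_⟩
      · rw [PySem.Dict.get?_insert]
        by_cases hn : n = e.2.1
        · subst hn
          rw [if_pos rfl]
          constructor
          · intro hv
            rw [Option.some.injEq] at hv; subst hv
            refine ⟨List.mem_append_right _ (List.mem_singleton.2 rfl), he, rfl,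
              fun y hy hy1 hy2 => ?_⟩
            rcases List.mem_append.1 hy with hy | hy
            · exact absurd hy2 (hempty y hy hy1)
            · rw [List.mem_singleton] at hy; subst hy; exact le_refl _
          · rintro ⟨hv, h1, h2, _⟩
            rcases List.mem_append.1 hv with hv | hv
            · exact absurd h2 (hempty v hv h1)
            · rw [List.mem_singleton] at hv; subst hv; rfl
        · rw [if_neg hn, hsome]
          constructor
          · rintro ⟨hv, h1, h2, h3⟩
            refine ⟨List.mem_append_left _ hv, h1, h2, fun y hy hy1 hy2 => ?_⟩
            rcases List.mem_append.1 hy with hy | hy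
            · exact h3 y hy hy1 hy2
            · rw [List.mem_singleton] at hy; subst hy; exact absurd hy2 (fun q => hn q.symm)
          · rintro ⟨hv, h1, h2, h3⟩
            rcases List.mem_append.1 hv with hv | hv
            · exact ⟨hv, h1, h2, fun y hy => h3 y (List.mem_append_left _ hy)⟩
            · rw [List.mem_singleton] at hv; subst hv; exact absurd h2 (fun q => hn q.symm)
      · rw [PySem.Dict.get?_insert]
        by_cases hn : n = e.2.1
        · subst hn
          rw [if_pos rfl]
          constructor
          · intro hO; cases hO
          · intro hall
            exact absurd rfl
              (hall e (List.mem_append_right _ (List.mem_singleton.2 rfl)) he)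
        · rw [if_neg hn, hnone]
          constructor
          · intro h y hy hy1
            rcases List.mem_append.1 hy with hy | hy
            · exact h y hy hy1
            · rw [List.mem_singleton] at hy; subst hy; exact fun q => hn q.symm
          · intro h y hy hy1; exact h y (List.mem_append_left _ hy) hy1
    · -- previous minimum cur for this name
      obtain ⟨hcmem, hc1, hc2, hcmin⟩ := (hsome e.2.1 cur).1 hg
      change pvInv (lp ++ [e]) (if pvKey e < pvKey cur then d.insert e.2.1 e else d)
      by_cases hlt : pvKey e < pvKey cur
      · rw [if_pos hlt]
        refine ⟨PySem.Dict.nodup_keys_insert _ _ _ hnd, fun n v => ?_, fun n => ?_⟩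
        · rw [PySem.Dict.get?_insert]
          by_cases hn : n = e.2.1
          · subst hn
            rw [if_pos rfl]
            constructor
            · intro hv
              rw [Option.some.injEq] at hv; subst hv
              refine ⟨List.mem_append_right _ (List.mem_singleton.2 rfl), he, rfl,
                fun y hy hy1 hy2 => ?_⟩
              rcases List.mem_append.1 hy with hy | hy
              · exact le_of_lt (lt_of_lt_of_le hlt (hcmin y hy hy1 hy2))
              · rw [List.mem_singleton] at hy; subst hy; exact le_refl _
            · rintro ⟨hv, h1, h2, h3⟩
              rcases List.mem_append.1 hv with hv | hv
              · -- v would be a minimum over lp, hence v = cur, yet v ≤ e < cur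
                have hvcur : v = cur := by
                  have : d.get? e.2.1 = some v :=
                    (hsome e.2.1 v).2 ⟨hv, h1, h2,
                      fun y hy => h3 y (List.mem_append_left _ hy)⟩
                  rw [hg, Option.some.injEq] at this; exact this.symm
                have hle : pvKey v ≤ pvKey e :=
                  h3 e (List.mem_append_right _ (List.mem_singleton.2 rfl)) he rfl
                rw [hvcur] at hle
                exact absurd hlt (not_lt.2 hle)
              · rw [List.mem_singleton] at hv; subst hv; rfl
          · rw [if_neg hn, hsome]
            constructor
            · rintro ⟨hv, h1, h2, h3⟩
              refine ⟨List.mem_append_left _ hv, h1, h2, fun y hy hy1 hy2 => ?_⟩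
              rcases List.mem_append.1 hy with hy | hy
              · exact h3 y hy hy1 hy2
              · rw [List.mem_singleton] at hy; subst hy; exact absurd hy2 (fun q => hn q.symm)
            · rintro ⟨hv, h1, h2, h3⟩
              rcases List.mem_append.1 hv with hv | hv
              · exact ⟨hv, h1, h2, fun y hy => h3 y (List.mem_append_left _ hy)⟩
              · rw [List.mem_singleton] at hv; subst hv; exact absurd h2 (fun q => hn q.symm)
        · rw [PySem.Dict.get?_insert]
          by_cases hn : n = e.2.1
          · subst hn
            rw [if_pos rfl]
            constructor
            · intro hO; cases hO
            · intro hall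
              exact absurd rfl
                (hall e (List.mem_append_right _ (List.mem_singleton.2 rfl)) he)
          · rw [if_neg hn, hnone]
            constructor
            · intro h y hy hy1
              rcases List.mem_append.1 hy with hy | hy
              · exact h y hy hy1
              · rw [List.mem_singleton] at hy; subst hy; exact fun q => hn q.symm
            · intro h y hy hy1; exact h y (List.mem_append_left _ hy) hy1
      · rw [if_neg hlt]
        have hle : pvKey cur ≤ pvKey e := le_of_not_gt hlt
        refine ⟨hnd, fun n v => ?_, fun n => ?_⟩
        · rw [hsome]
          constructor
          · rintro ⟨hv, h1, h2, h3⟩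
            refine ⟨List.mem_append_left _ hv, h1, h2, fun y hy hy1 hy2 => ?_⟩
            rcases List.mem_append.1 hy with hy | hy
            · exact h3 y hy hy1 hy2
            · rw [List.mem_singleton] at hy; subst hy
              -- v is the lp-minimum for this name, cur has this name: v ≤ cur ≤ y
              exact le_trans (h3 cur hcmem hc1 (hc2.trans hy2)) hle
          · rintro ⟨hv, h1, h2, h3⟩
            rcases List.mem_append.1 hv with hv | hv
            · exact ⟨hv, h1, h2, fun y hy => h3 y (List.mem_append_left _ hy)⟩
            · rw [List.mem_singleton] at hv; subst hv
              -- v = e; then e ≤ cur and cur ≤ e force e = cur ∈ lp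
              have h4 : pvKey v ≤ pvKey cur :=
                h3 cur (List.mem_append_left _ hcmem) hc1 (h2 ▸ hc2)
              have hvc : v = cur := pvKey_inj (le_antisymm h4 hle)
              exact ⟨hvc ▸ hcmem, h1, h2,
                fun y hy hy1 hy2 => h3 y (List.mem_append_left _ hy) hy1 hy2⟩
        · rw [hnone]
          constructor
          · intro h y hy hy1
            rcases List.mem_append.1 hy with hy | hy
            · exact h y hy hy1
            · rw [List.mem_singleton] at hy; subst hy
              intro hq
              have := h cur hcmem hc1
              exact this (hc2.trans hq)
          · intro h y hy hy1; exact h y (List.mem_append_left _ hy) hy1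

lemma pvInv_fold (l lp : List (Int × String × String × String))
    (d : PySem.Dict String (Int × String × String × String)) (h : pvInv lp d) :
    pvInv (lp ++ l) (l.foldl pvBStep d) := by
  induction l generalizing lp d with
  | nil => simpa using h
  | cons e t ih =>
    have := ih (lp ++ [e]) (pvBStep d e) (pvInv_step lp d e h)
    simpa using this

lemma pvInv_best (l : List (Int × String × String × String)) :
    pvInv l (l.foldl pvBStep PySem.Dict.empty) := by
  have h0 : pvInv [] PySem.Dict.empty := by
    refine ⟨by simp [PySem.Dict.keys_empty], ?_, ?_⟩ <;> simp [PySem.Dict.get?_empty]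
  simpa using pvInv_fold l [] PySem.Dict.empty h0

-- A's scan over the sorted list, as a picked sublist
def pvPick : List (Int × String × String × String) → PySem.Set String →
    List (Int × String × String × String)
  | [], _ => []
  | e :: t, seen =>
    if !(is_definition e.1) then pvPick t seen
    else if PySem.Set.contains seen e.2.1 then pvPick t seen
    else e :: pvPick t (PySem.Set.add seen e.2.1)

def pvE (lst : List (Int × String × String × String)) : String :=
  PySem.Str.join "" (lst.map pvFmt)

lemma pvE_cons (e : Int × String × String × String)
    (t : List (Int × String × String × String)) :
    pvE (e :: t) = pvFmt e ++ pvE t := by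
  cases t with
  | nil => simp [pvE, PySem.Str.join, PySem.Chars.join_singleton, PySem.Chars.join_nil]
  | cons f r =>
    simp [pvE, PySem.Str.join, PySem.Chars.join_cons_cons]

lemma pvAfold (l : List (Int × String × String × String)) (str : String)
    (seen : PySem.Set String) :
    (l.foldl pvAStep (str, seen)).1 = str ++ pvE (pvPick l seen) := by
  induction l generalizing str seen with
  | nil => simp [pvPick, pvE, PySem.Str.join, PySem.Chars.join_nil]
  | cons e t ih =>
    rw [List.foldl_cons]
    simp only [pvPick]
    by_cases h1 : (!is_definition e.1) = true
    · rw [if_pos h1, show pvAStep (str, seen) e = (str, seen) from by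
        simp only [pvAStep, if_pos h1], ih]
    · rw [if_neg h1]
      by_cases h2 : PySem.Set.contains seen e.2.1 = true
      · rw [if_pos h2, show pvAStep (str, seen) e = (str, seen) from by
          simp only [pvAStep, if_neg h1, if_pos h2], ih]
      · rw [if_neg h2, show pvAStep (str, seen) e = (str ++ pvFmt e, PySem.Set.add seen e.2.1) from by
          simp only [pvAStep, if_neg h1, if_neg h2], ih, pvE_cons, ← String.append_assoc]

lemma pvPick_sublist (l : List (Int × String × String × String))
    (seen : PySem.Set String) : (pvPick l seen).Sublist l := by
  induction l generalizing seen with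
  | nil => simp [pvPick]
  | cons e t ih =>
    simp only [pvPick]
    split
    · exact (ih seen).cons e
    · split
      · exact (ih seen).cons e
      · exact (ih _).cons₂ e

lemma pvPick_avoids (l : List (Int × String × String × String))
    (seen : PySem.Set String) :
    ∀ x ∈ pvPick l seen, x.2.1 ∉ seen := by
  induction l generalizing seen with
  | nil => simp [pvPick]
  | cons e t ih =>
    simp only [pvPick]
    split
    · exact ih seen
    · split
      · exact ih seen
      · intro x hx
        rcases List.mem_cons.1 hx with hx | hx
        · subst hx
          intro hmem
          rename_i hcf
          rw [Bool.not_eq_true] at hcf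
          rw [← pvContains_iff] at hmem
          rw [hcf] at hmem
          cases hmem
        · intro hmem
          exact ih _ x hx (pvMem_add.2 (Or.inr hmem))

lemma pvPick_names_nodup (l : List (Int × String × String × String))
    (seen : PySem.Set String) :
    ((pvPick l seen).map (fun e => e.2.1)).Nodup := by
  induction l generalizing seen with
  | nil => simp [pvPick]
  | cons e t ih =>
    simp only [pvPick]
    split
    · exact ih seen
    · split
      · exact ih seen
      · rw [List.map_cons, List.nodup_cons]
        refine ⟨?_, ih _⟩
        intro hmem
        rcases List.mem_map.1 hmem with ⟨x, hx, hxn⟩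
        exact pvPick_avoids t _ x hx (pvMem_add.2 (Or.inl hxn))

lemma pvPick_mem (l : List (Int × String × String × String))
    (hs : l.Pairwise (fun a b => pvKey a ≤ pvKey b))
    (seen : PySem.Set String) (x : Int × String × String × String) :
    x ∈ pvPick l seen ↔
      (x ∈ l ∧ x.1 ≠ 0 ∧ x.2.1 ∉ seen ∧
        ∀ y ∈ l, y.1 ≠ 0 → y.2.1 = x.2.1 → pvKey x ≤ pvKey y) := by
  induction l generalizing seen with
  | nil => simp [pvPick]
  | cons e t ih =>
    obtain ⟨hele, ht⟩ := List.pairwise_cons.1 hs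
    simp only [pvPick]
    split
    · -- e is not a definition
      rename_i hcond
      have he0 : e.1 = 0 := by
        simp only [Bool.not_eq_eq_eq_not, Bool.not_true, is_definition] at hcond
        simpa using hcond
      rw [ih ht seen]
      constructor
      · rintro ⟨hx, h1, h2, h3⟩
        refine ⟨List.mem_cons_of_mem _ hx, h1, h2, fun y hy hy1 hy2 => ?_⟩
        rcases List.mem_cons.1 hy with hy | hy
        · subst hy; exact absurd he0 hy1
        · exact h3 y hy hy1 hy2
      · rintro ⟨hx, h1, h2, h3⟩
        rcases List.mem_cons.1 hx with hx | hx
        · subst hx; exact absurd he0 h1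
        · exact ⟨hx, h1, h2, fun y hy => h3 y (List.mem_cons_of_mem _ hy)⟩
    · split
      · -- e.2.1 already seen
        rename_i hcond hseen
        have heseen : e.2.1 ∈ seen := pvContains_iff.1 hseen
        rw [ih ht seen]
        constructor
        · rintro ⟨hx, h1, h2, h3⟩
          refine ⟨List.mem_cons_of_mem _ hx, h1, h2, fun y hy hy1 hy2 => ?_⟩
          rcases List.mem_cons.1 hy with hy | hy
          · subst hy; exact absurd (hy2 ▸ heseen) h2
          · exact h3 y hy hy1 hy2
        · rintro ⟨hx, h1, h2, h3⟩
          rcases List.mem_cons.1 hx with hx | hx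
          · subst hx; exact absurd heseen h2
          · exact ⟨hx, h1, h2, fun y hy => h3 y (List.mem_cons_of_mem _ hy)⟩
      · -- e is kept
        rename_i hcond hseen
        have he1 : e.1 ≠ 0 := by
          simp only [Bool.not_eq_eq_eq_not, Bool.not_true, Bool.not_eq_false,
            is_definition] at hcond
          simpa using hcond
        have heseen : e.2.1 ∉ seen := by
          rw [Bool.not_eq_true] at hseen
          intro hq; rw [← pvContains_iff, hseen] at hq; cases hq
        rw [List.mem_cons, ih ht (PySem.Set.add seen e.2.1)]
        constructor
        · rintro (hx | ⟨hx, h1, h2, h3⟩)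
          · subst hx
            refine ⟨List.mem_cons_self, he1, heseen, fun y hy hy1 hy2 => ?_⟩
            rcases List.mem_cons.1 hy with hy | hy
            · subst hy; exact le_refl _
            · exact hele y hy
          · have hxe : x.2.1 ≠ e.2.1 := fun q =>
              h2 (pvMem_add.2 (Or.inl q))
            have hxs : x.2.1 ∉ seen := fun q => h2 (pvMem_add.2 (Or.inr q))
            refine ⟨List.mem_cons_of_mem _ hx, h1, hxs, fun y hy hy1 hy2 => ?_⟩
            rcases List.mem_cons.1 hy with hy | hy
            · subst hy; exact absurd hy2 (fun q => hxe q.symm)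
            · exact h3 y hy hy1 hy2
        · rintro ⟨hx, h1, h2, h3⟩
          rcases List.mem_cons.1 hx with hx | hx
          · exact Or.inl hx
          · by_cases hname : x.2.1 = e.2.1
            · have h4 : pvKey x ≤ pvKey e :=
                h3 e List.mem_cons_self he1 hname.symm
              have h5 : pvKey e ≤ pvKey x := hele x hx
              exact Or.inl (pvKey_inj (le_antisymm h4 h5))
            · refine Or.inr ⟨hx, h1, ?_, fun y hy => h3 y (List.mem_cons_of_mem _ hy)⟩
              intro hq
              rcases pvMem_add.1 hq with hq | hq
              · exact hname hq
              · exact h2 hq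

lemma pvValues_mem (l : List (Int × String × String × String))
    (x : Int × String × String × String) :
    x ∈ (l.foldl pvBStep PySem.Dict.empty).values ↔
      (x ∈ l ∧ x.1 ≠ 0 ∧ ∀ y ∈ l, y.1 ≠ 0 → y.2.1 = x.2.1 → pvKey x ≤ pvKey y) := by
  obtain ⟨hnd, hsome, _⟩ := pvInv_best l
  unfold PySem.Dict.values
  rw [List.mem_map]
  constructor
  · rintro ⟨⟨k, v⟩, hp, hv⟩
    subst hv
    have := (PySem.Dict.get?_eq_some_iff_mem_items _ k v hnd).2 hp
    obtain ⟨h0, h1, _, h3⟩ := (hsome k v).1 this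
    exact ⟨h0, h1, by rename_i h2'; exact h2' ▸ h3⟩
  · rintro ⟨h0, h1, h3⟩
    refine ⟨(x.2.1, x), ?_, rfl⟩
    exact (PySem.Dict.get?_eq_some_iff_mem_items _ _ _ hnd).1
      ((hsome x.2.1 x).2 ⟨h0, h1, rfl, h3⟩)

lemma pvValues_nodup (l : List (Int × String × String × String)) :
    (l.foldl pvBStep PySem.Dict.empty).values.Nodup := by
  obtain ⟨hnd, hsome, _⟩ := pvInv_best l
  set d := l.foldl pvBStep PySem.Dict.empty with hd
  have hmap : d.items.map (fun p => p.1) = d.items.map (fun p => p.2.2.1) := by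
    apply List.map_congr_left
    intro p hp
    have := (PySem.Dict.get?_eq_some_iff_mem_items _ p.1 p.2 hnd).2 (by simpa using hp)
    exact ((hsome p.1 p.2).1 this).2.2.1.symm
  have : (d.values.map (fun v => v.2.1)).Nodup := by
    unfold PySem.Dict.values
    rw [List.map_map]
    have : d.keys = d.items.map (fun p => p.2.2.1) := by
      unfold PySem.Dict.keys at hnd ⊢; exact hmap
    rw [this] at hnd
    exact hnd
  exact this.of_map _

lemma pvMain (l : List (Int × String × String × String)) :
    pvPick (PySem.List.sorted l pvKey false) PySem.Set.empty =
      PySem.List.sorted (l.foldl pvBStep PySem.Dict.empty).values pvKey false := by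
  have hS : (PySem.List.sorted l pvKey false).Pairwise (fun a b => pvKey a ≤ pvKey b) :=
    PySem.List.sorted_pairwise l pvKey
  have hPmem : ∀ x, x ∈ pvPick (PySem.List.sorted l pvKey false) PySem.Set.empty ↔
      (x ∈ l ∧ x.1 ≠ 0 ∧ ∀ y ∈ l, y.1 ≠ 0 → y.2.1 = x.2.1 → pvKey x ≤ pvKey y) := by
    intro x
    rw [pvPick_mem _ hS _ x]
    constructor
    · rintro ⟨h0, h1, _, h3⟩
      exact ⟨(PySem.List.mem_sorted l pvKey false x).1 h0, h1,
        fun y hy => h3 y ((PySem.List.mem_sorted l pvKey false y).2 hy)⟩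
    · rintro ⟨h0, h1, h3⟩
      exact ⟨(PySem.List.mem_sorted l pvKey false x).2 h0, h1, by simp [PySem.Set.empty],
        fun y hy => h3 y ((PySem.List.mem_sorted l pvKey false y).1 hy)⟩
  have hRmem : ∀ x, x ∈ PySem.List.sorted (l.foldl pvBStep PySem.Dict.empty).values pvKey false ↔
      (x ∈ l ∧ x.1 ≠ 0 ∧ ∀ y ∈ l, y.1 ≠ 0 → y.2.1 = x.2.1 → pvKey x ≤ pvKey y) := by
    intro x
    rw [PySem.List.mem_sorted, pvValues_mem]
  have hPnd : (pvPick (PySem.List.sorted l pvKey false) PySem.Set.empty).Nodup :=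
    (pvPick_names_nodup _ _).of_map _
  have hRnd : (PySem.List.sorted (l.foldl pvBStep PySem.Dict.empty).values pvKey false).Nodup :=
    ((PySem.List.sorted_perm _ _ _).nodup_iff).2 (pvValues_nodup l)
  have hperm : (pvPick (PySem.List.sorted l pvKey false) PySem.Set.empty).Perm
      (PySem.List.sorted (l.foldl pvBStep PySem.Dict.empty).values pvKey false) := by
    apply List.perm_of_nodup_nodup_toFinset_eq hPnd hRnd
    ext x
    simp only [List.mem_toFinset]
    rw [hPmem, hRmem]
  exact PySem.List.eq_of_perm_of_pairwise_le_of_injective pvKey pvKey_inj hperm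
    (List.Pairwise.sublist (pvPick_sublist _ _) hS)
    (PySem.List.sorted_pairwise _ _)

-- ===== VERDICT (by name: the statement is the Claim_ definition above) =====
theorem AMPL_variable_defs_spec : Claim_equal_AMPL_variable_defs := by
  intro l _
  show _ = _
  unfold AMPL_variable_defs AMPL_variable_defs_alt
  rw [pvAfold, pvMain]
  simp [pvE]
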